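-- pv_equiv track=rewrite | github.com/b21727432/HackerRank | stock price python/stock.py | priceFallsConstantly
-- ===== SOURCE A (Python) =====
-- def priceFallsConstantly(l):
--     l1 = []
--     length = len(l)
--     for i in range(0,length-1,1):
--         check = True
--         for j in range(i+1,length,1):
--             if l[i] < l[j]:
--                 check = False
--         if check:
--             l1.append(l[i])
--
--     l1.append(l[-1])
--     return l1
-- ===== SOURCE B (Python) =====
-- def priceFallsConstantly(l):
--     m = l[-1]
--     res = [m]
--     for x in reversed(l[:-1]):
--         if x >= m:
--             res.append(x)
--             m = x
--     res.reverse()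
--     return res
-- ===== Notes on version B (the rewrite author's own statement) =====
-- stated objective: faster
-- what changed: Replaced the quadratic all-later-elements rescan with a single right-to-left pass that tracks the running suffix maximum and collects elements in reverse.
import Mathlib
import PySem

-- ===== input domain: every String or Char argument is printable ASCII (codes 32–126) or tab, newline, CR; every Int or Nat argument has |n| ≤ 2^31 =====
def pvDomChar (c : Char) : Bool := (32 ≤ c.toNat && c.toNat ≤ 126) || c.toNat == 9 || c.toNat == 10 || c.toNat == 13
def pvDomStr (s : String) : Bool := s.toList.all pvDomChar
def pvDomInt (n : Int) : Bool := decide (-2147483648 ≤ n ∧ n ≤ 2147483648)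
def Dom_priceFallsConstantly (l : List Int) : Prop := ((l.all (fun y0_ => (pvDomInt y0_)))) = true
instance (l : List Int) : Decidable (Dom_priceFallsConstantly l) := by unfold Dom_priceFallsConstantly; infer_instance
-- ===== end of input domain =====

-- B replaces A's quadratic rescan of all later elements by a single right-to-left pass
-- tracking the running suffix maximum.

-- ===== PORT A =====
def priceFallsConstantly (l : List Int) : List Int :=
  let length : Int := l.length
  let l1 := (PySem.List.pyRange 0 (length - 1) 1).foldl (fun l1 i =>
    let check := (PySem.List.pyRange (i + 1) length 1).foldl (fun check j =>
      if PySem.List.pyGetD l i 0 < PySem.List.pyGetD l j 0 then false else check) true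
    if check then l1 ++ [PySem.List.pyGetD l i 0] else l1) []
  l1 ++ [PySem.List.pyGetD l (-1) 0]

-- ===== PORT B =====
def priceFallsConstantly_alt (l : List Int) : List Int :=
  let m0 := PySem.List.pyGetD l (-1) 0
  let st := (PySem.List.slice l none (some (-1))).reverse.foldl
    (fun (st : List Int × Int) x => if st.2 ≤ x then (st.1 ++ [x], x) else st) ([m0], m0)
  st.1.reverse

-- ===== PRECONDITION & SPEC =====
-- Pre_ excludes only the empty list, on which both Pythons raise IndexError (last-element access).
def Pre_priceFallsConstantly (l : List Int) : Prop := l ≠ []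
instance (l : List Int) : Decidable (Pre_priceFallsConstantly l) := by unfold Pre_priceFallsConstantly; infer_instance
def pvWitness_priceFallsConstantly : List Int := [3, 1, 2, 2]

def Spec_priceFallsConstantly (l : List Int) (out : List Int) : Prop := out = priceFallsConstantly_alt l
instance (l : List Int) (out : List Int) : Decidable (Spec_priceFallsConstantly l out) := by unfold Spec_priceFallsConstantly; infer_instance

-- ===== CLAIM (what is proved, stated in full; the proofs are below) =====
def Claim_equal_priceFallsConstantly : Prop := ∀ (l : List Int), Dom_priceFallsConstantly l → Pre_priceFallsConstantly l → Spec_priceFallsConstantly l (priceFallsConstantly l)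

-- ===== LEMMAS AND PROOFS =====

-- Common characterisation: keep x iff no later element exceeds it (last element trivially kept).
def pvF : List Int → List Int
  | [] => []
  | x :: xs => if xs.any (fun y => decide (x < y)) then pvF xs else x :: pvF xs

-- A's l1: indices below length-1 whose suffix has no larger element, mapped to their values.
def pvA1fun (l : List Int) : List Int :=
  ((List.range (l.length - 1)).filter
      (fun k => !((l.drop (k + 1)).any (fun y => decide (l.getD k 0 < y))))).map
    (fun k => l.getD k 0)

-- B's loop as a function of the remaining (reversed) input and the running max.
def pvK : List Int → Int → List Int
  | [], _ => []
  | x :: t, m => if m ≤ x then x :: pvK t x else pvK t m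

lemma pv_any_range_getD (l : List Int) (p : Int → Bool) :
    (List.range l.length).any (fun m => p (l.getD m 0)) = l.any p := by
  induction l with
  | nil => simp
  | cons x xs ih =>
    simp [List.range_succ_eq_map, List.any_map, Function.comp_def]
    exact congrArg (_ || ·) ih

lemma pv_any_drop_range (l : List Int) (d : Nat) (p : Int → Bool) :
    (List.range (l.length - d)).any (fun m => p (l.getD (d + m) 0)) = (l.drop d).any p := by
  have h := pv_any_range_getD (l.drop d) p
  simpa [List.getD_eq_getElem?_getD, List.getElem?_drop] using h

lemma pv_inner_eq (l : List Int) (k : Nat) :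
    ((PySem.List.pyRange ((k : Int) + 1) (l.length : Int) 1).any
      (fun j => decide (PySem.List.pyGetD l (k : Int) 0 < PySem.List.pyGetD l j 0)))
    = (l.drop (k + 1)).any (fun y => decide (l.getD k 0 < y)) := by
  rw [PySem.List.pyRange_one, List.any_map]
  have hidx : ∀ m : Nat, ((k : Int) + 1 + (m : Int)) = ((k + 1 + m : Nat) : Int) := by
    intro m; push_cast; ring
  have hn : (((l.length : Int)) - ((k : Int) + 1)).toNat = l.length - (k + 1) := by omega
  have hfun : (fun m : Nat => decide (PySem.List.pyGetD l (k : Int) 0 < PySem.List.pyGetD l ((k : Int) + 1 + (m : Int)) 0))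
      = (fun m : Nat => decide (l.getD k 0 < l.getD (k + 1 + m) 0)) := by
    funext m
    rw [hidx m, PySem.List.pyGetD_natCast, PySem.List.pyGetD_natCast]
  rw [hn]
  calc (List.range (l.length - (k+1))).any ((fun j => decide (PySem.List.pyGetD l (k : Int) 0 < PySem.List.pyGetD l j 0)) ∘ (fun m : Nat => (k : Int) + 1 + (m : Int)))
      = (List.range (l.length - (k+1))).any (fun m : Nat => decide (l.getD k 0 < l.getD (k + 1 + m) 0)) := by
        rw [show ((fun j => decide (PySem.List.pyGetD l (k : Int) 0 < PySem.List.pyGetD l j 0)) ∘ (fun m : Nat => (k : Int) + 1 + (m : Int))) = _ from hfun]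
    _ = (l.drop (k + 1)).any (fun y => decide (l.getD k 0 < y)) := by
        exact pv_any_drop_range l (k + 1) (fun y => decide (l.getD k 0 < y))

lemma pvA_eq_A1 (l : List Int) :
    priceFallsConstantly l = pvA1fun l ++ [PySem.List.pyGetD l (-1) 0] := by
  show (PySem.List.pyRange 0 ((l.length : Int) - 1) 1).foldl (fun l1 i =>
      let check := (PySem.List.pyRange (i + 1) (l.length : Int) 1).foldl (fun check j =>
        if PySem.List.pyGetD l i 0 < PySem.List.pyGetD l j 0 then false else check) true
      if check then l1 ++ [PySem.List.pyGetD l i 0] else l1) []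
    ++ [PySem.List.pyGetD l (-1) 0] = _
  congr 1
  have hbody : ∀ (l1 : List Int) (i : Int),
      (let check := (PySem.List.pyRange (i + 1) (l.length : Int) 1).foldl (fun check j =>
        if PySem.List.pyGetD l i 0 < PySem.List.pyGetD l j 0 then false else check) true
      if check then l1 ++ [PySem.List.pyGetD l i 0] else l1)
      = (if !((PySem.List.pyRange (i + 1) (l.length : Int) 1).any
            (fun j => decide (PySem.List.pyGetD l i 0 < PySem.List.pyGetD l j 0)))
         then l1 ++ [PySem.List.pyGetD l i 0] else l1) := by
    intro l1 i
    show (if ((PySem.List.pyRange (i + 1) (l.length : Int) 1).foldl (fun check j =>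
        if PySem.List.pyGetD l i 0 < PySem.List.pyGetD l j 0 then false else check) true) = true
      then l1 ++ [PySem.List.pyGetD l i 0] else l1) = _
    rw [show ((PySem.List.pyRange (i + 1) (l.length : Int) 1).foldl (fun check j =>
        if PySem.List.pyGetD l i 0 < PySem.List.pyGetD l j 0 then false else check) true)
      = !((PySem.List.pyRange (i + 1) (l.length : Int) 1).any
          (fun j => decide (PySem.List.pyGetD l i 0 < PySem.List.pyGetD l j 0))) from by
      simpa using PySem.List.foldl_if_false_eq
        (fun j => decide (PySem.List.pyGetD l i 0 < PySem.List.pyGetD l j 0))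
        (PySem.List.pyRange (i + 1) (l.length : Int) 1) true]
  have hstep : (PySem.List.pyRange 0 ((l.length : Int) - 1) 1).foldl (fun l1 i =>
      let check := (PySem.List.pyRange (i + 1) (l.length : Int) 1).foldl (fun check j =>
        if PySem.List.pyGetD l i 0 < PySem.List.pyGetD l j 0 then false else check) true
      if check then l1 ++ [PySem.List.pyGetD l i 0] else l1) []
      = (PySem.List.pyRange 0 ((l.length : Int) - 1) 1).foldl (fun l1 i =>
        if !((PySem.List.pyRange (i + 1) (l.length : Int) 1).any
            (fun j => decide (PySem.List.pyGetD l i 0 < PySem.List.pyGetD l j 0)))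
        then l1 ++ [PySem.List.pyGetD l i 0] else l1) [] :=
    PySem.List.foldl_congr_mem _ _ _ _ (fun acc i _ => hbody acc i)
  rw [hstep]
  rw [PySem.List.foldl_append_if]
  rw [PySem.List.pyRange_one]
  rw [List.filter_map, List.map_map, List.nil_append]
  unfold pvA1fun
  have hn : (((l.length : Int) - 1) - 0).toNat = l.length - 1 := by omega
  rw [hn]
  congr 1
  · funext k
    show (fun i : Int => PySem.List.pyGetD l i 0) ((0 : Int) + (k : Int)) = l.getD k 0
    simp
  · apply List.filter_congr
    intro k hk
    show (!((PySem.List.pyRange (((0:Int) + (k:Int)) + 1) (l.length : Int) 1).any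
        (fun j => decide (PySem.List.pyGetD l ((0:Int) + (k:Int)) 0 < PySem.List.pyGetD l j 0)))) = _
    rw [show ((0:Int) + (k:Int)) = (k:Int) by ring]
    rw [pv_inner_eq l k]

lemma pvA1fun_cons (x : Int) (xs : List Int) (hxs : xs ≠ []) :
    pvA1fun (x :: xs) = (if xs.any (fun y => decide (x < y)) then [] else [x]) ++ pvA1fun xs := by
  unfold pvA1fun
  have hlen : (x :: xs).length - 1 = (xs.length - 1) + 1 := by
    cases xs with | nil => exact absurd rfl hxs | cons a t => simp
  rw [hlen, List.range_succ_eq_map, List.filter_cons]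
  have h0 : (!((x :: xs).drop (0 + 1)).any (fun y => decide ((x :: xs).getD 0 0 < y)))
      = !(xs.any (fun y => decide (x < y))) := by simp
  rw [h0]
  have hshift : ((List.range (xs.length - 1)).map Nat.succ).filter
        (fun k => !(((x :: xs).drop (k + 1)).any (fun y => decide ((x :: xs).getD k 0 < y))))
      = ((List.range (xs.length - 1)).filter
        (fun k => !((xs.drop (k + 1)).any (fun y => decide (xs.getD k 0 < y))))).map Nat.succ := by
    rw [List.filter_map]
    exact congrArg _ (List.filter_congr (fun k _ => by simp [Nat.succ_eq_add_one]; rfl))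
  by_cases hb : xs.any (fun y => decide (x < y))
  · rw [hb]
    simp only [Bool.not_true, Bool.false_eq_true, if_false, hshift, List.map_map, Function.comp_def]
    simp
  · rw [eq_false_of_ne_true hb]
    simp only [Bool.not_false, if_true, List.map_cons, hshift, List.map_map, Function.comp_def]
    simp

lemma pvA1 : ∀ (l : List Int) (h : l ≠ []), pvA1fun l ++ [l.getLast h] = pvF l := by
  intro l
  induction l with
  | nil => intro h; exact absurd rfl h
  | cons x xs ih =>
    intro _
    cases xs with
    | nil => simp [pvA1fun, pvF]
    | cons y t =>
      have hxs : (y :: t) ≠ [] := by simp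
      rw [pvA1fun_cons x (y :: t) hxs, List.getLast_cons hxs, List.append_assoc, ih hxs]
      by_cases hb : (y :: t).any (fun z => decide (x < z))
      · simp [pvF, hb]
      · simp [pvF, hb]

lemma pvA_eq (l : List Int) (h : l ≠ []) : priceFallsConstantly l = pvF l := by
  rw [pvA_eq_A1, PySem.List.pyGetD_neg_one l 0 h, pvA1 l h]

lemma pvK_fold : ∀ (r : List Int) (acc : List Int) (m : Int),
    r.foldl (fun (st : List Int × Int) x => if st.2 ≤ x then (st.1 ++ [x], x) else st) (acc, m)
    = (acc ++ pvK r m, r.foldl max m) := by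
  intro r
  induction r with
  | nil => intro acc m; simp [pvK]
  | cons x t ih =>
    intro acc m
    by_cases hx : m ≤ x
    · simp only [List.foldl_cons, if_pos hx, ih, pvK, max_eq_right hx]
      simp
    · simp only [List.foldl_cons, if_neg hx, ih, pvK]
      rw [max_eq_left (le_of_lt (lt_of_not_ge hx))]

lemma pvK_append : ∀ (s : List Int) (m x : Int),
    pvK (s ++ [x]) m = pvK s m ++ (if s.foldl max m ≤ x then [x] else []) := by
  intro s
  induction s with
  | nil => intro m x; simp [pvK]
  | cons a t ih =>
    intro m x
    by_cases ha : m ≤ a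
    · simp only [List.cons_append, pvK, if_pos ha, ih, List.foldl_cons, max_eq_right ha]
    · simp only [List.cons_append, pvK, if_neg ha, ih, List.foldl_cons,
        max_eq_left (le_of_lt (lt_of_not_ge ha))]

lemma pv_foldl_max_le (s : List Int) (m x : Int) :
    s.foldl max m ≤ x ↔ m ≤ x ∧ ∀ y ∈ s, y ≤ x := by
  induction s generalizing m with
  | nil => simp
  | cons a t ih =>
    simp only [List.foldl_cons, ih, max_le_iff, List.mem_cons]
    constructor
    · rintro ⟨⟨h1, h2⟩, h3⟩
      exact ⟨h1, fun y hy => hy.elim (fun e => e ▸ h2) (h3 y)⟩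
    · rintro ⟨h1, h2⟩
      exact ⟨⟨h1, h2 a (Or.inl rfl)⟩, fun y hy => h2 y (Or.inr hy)⟩

lemma pvR : ∀ (ys : List Int) (z : Int),
    (pvK ys.reverse z).reverse ++ [z] = pvF (ys ++ [z]) := by
  intro ys
  induction ys with
  | nil => intro z; simp [pvK, pvF]
  | cons x t ih =>
    intro z
    simp only [List.cons_append]
    rw [List.reverse_cons, pvK_append]
    by_cases hmax : t.reverse.foldl max z ≤ x
    · rw [if_pos hmax]
      have hany : ((t ++ [z]).any (fun y => decide (x < y))) = false := by
        rw [pv_foldl_max_le] at hmax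
        simp only [List.any_eq_false, List.mem_append, List.mem_singleton]
        rintro y (hy | rfl)
        · simpa using hmax.2 y (by simpa using hy)
        · simpa using hmax.1
      rw [List.reverse_append]
      simp only [List.reverse_singleton, List.cons_append]
      rw [show pvF (x :: (t ++ [z])) = x :: pvF (t ++ [z]) by simp [pvF, hany]]
      rw [← ih z]
      simp
    · rw [if_neg hmax]
      have hany : ((t ++ [z]).any (fun y => decide (x < y))) = true := by
        rw [pv_foldl_max_le] at hmax
        push Not at hmax
        simp only [List.any_eq_true, List.mem_append, List.mem_singleton]
        by_cases hz : z ≤ x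
        · obtain ⟨y, hy, hxy⟩ := hmax hz
          exact ⟨y, Or.inl (by simpa using hy), by simpa using hxy⟩
        · exact ⟨z, Or.inr rfl, by simpa using lt_of_not_ge hz⟩
      rw [List.append_nil]
      rw [show pvF (x :: (t ++ [z])) = pvF (t ++ [z]) by simp [pvF, hany]]
      rw [← ih z]

lemma pvB_eq (l : List Int) (h : l ≠ []) : priceFallsConstantly_alt l = pvF l := by
  show ((PySem.List.slice l none (some (-1))).reverse.foldl
      (fun (st : List Int × Int) x => if st.2 ≤ x then (st.1 ++ [x], x) else st)
      ([PySem.List.pyGetD l (-1) 0], PySem.List.pyGetD l (-1) 0)).1.reverse = pvF l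
  rw [PySem.List.slice_to_neg_one, PySem.List.pyGetD_neg_one l 0 h, pvK_fold]
  show (([l.getLast h] ++ pvK l.dropLast.reverse (l.getLast h)) : List Int).reverse = pvF l
  rw [List.reverse_append, List.reverse_singleton]
  show (pvK l.dropLast.reverse (l.getLast h)).reverse ++ [l.getLast h] = pvF l
  rw [pvR l.dropLast (l.getLast h), List.dropLast_append_getLast h]

-- ===== VERDICT (by name: the statement is the Claim_ definition above) =====
theorem priceFallsConstantly_spec : Claim_equal_priceFallsConstantly := by
  intro l _ hpre
  show priceFallsConstantly l = priceFallsConstantly_alt l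
  rw [pvA_eq l hpre, pvB_eq l hpre]
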